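-- pv_equiv track=rewrite | github.com/nikhilcusc/HRP-1 | ProbSol/DP/abb.py | abbreviation
-- ===== SOURCE A (Python) =====
-- def abbreviation(a,b):
--     d=[[0 for _ in range(len(b)+1)] for i in  range(len(a)+1)]
--
--     d[0][0]=1
--     for i in range(len(a)):
--         for j in  range(len(b)+1):
--             #skip the row if previous is 0
--             if d[i][j]==0:
--                 continue
--             # character matches then move to next character for both strings and make it 1
--             if j<len(b) and a[i].upper() == b[j]:
--                 d[i+1][j+1]=1
--             # if charater does not match and in string 'a' character is lower, we can remove it hence we can keep it 1, as it is possible to match the 2 stings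
--             if not a[i].isupper():
--                 d[i+1][j]=1
--
--     if d[len(a)][len(b)]:
--         return 'YES'
--     return 'NO'
-- ===== SOURCE B (Python) =====
-- def abbreviation(a, b):
--     # Top-down memoized recursion: f(i, j) == "a[i:] can be abbreviated to b[j:]".
--     # Only states actually reachable from (0, 0) are ever computed.
--     n, m = len(a), len(b)
--     memo = {}
--
--     def f(i, j):
--         if i == n:
--             return j == m
--         hit = memo.get((i, j))
--         if hit is not None:
--             return hit
--         res = (j < m and a[i].upper() == b[j] and f(i + 1, j + 1)) \
--               or (not a[i].isupper() and f(i + 1, j))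
--         memo[(i, j)] = res
--         return res
--
--     return 'YES' if f(0, 0) else 'NO'
-- ===== Notes on version B (the rewrite author's own statement) =====
-- stated objective: alternative
-- what changed: A fills the full (len(a)+1)x(len(b)+1) reachability table bottom-up, touching every cell; B is a top-down memoized recursion f(i,j) = 'a[i:] can be abbreviated to b[j:]' keyed by a dict, so only the (i,j) states actually reachable from (0,0) are ever computed and the table disappears (recursion depth is len(a)).
import Mathlib
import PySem

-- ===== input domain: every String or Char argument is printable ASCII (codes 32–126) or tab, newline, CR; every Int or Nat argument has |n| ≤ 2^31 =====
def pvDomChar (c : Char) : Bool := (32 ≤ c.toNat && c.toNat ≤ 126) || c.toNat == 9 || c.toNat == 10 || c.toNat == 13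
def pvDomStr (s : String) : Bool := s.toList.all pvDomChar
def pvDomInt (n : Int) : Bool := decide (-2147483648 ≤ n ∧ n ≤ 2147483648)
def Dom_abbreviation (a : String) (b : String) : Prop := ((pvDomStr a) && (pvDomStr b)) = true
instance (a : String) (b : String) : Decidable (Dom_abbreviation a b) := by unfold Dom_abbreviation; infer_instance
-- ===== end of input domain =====

-- B replaces A's bottom-up forward reachability table by a top-down memoized
-- recursion f(i,j) = "a[i:] can be abbreviated to b[j:]" that computes only the
-- states reachable from (0,0) (objective: alternative decomposition, same worst-case cost).


-- ===== PORT A =====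
-- d[i][j] read / write, Python style (indices are always in range in A's loops)
def pvCell (d : List (List Int)) (i j : Int) : Int :=
  PySem.List.pyGetD (PySem.List.pyGetD d i []) j 0
def pvSetCell (d : List (List Int)) (i j : Int) (v : Int) : List (List Int) :=
  PySem.List.pySetD d i (PySem.List.pySetD (PySem.List.pyGetD d i []) j v)

-- the body of the inner 'for j' loop of A
def pvBody (al bl : List Char) (i : Int) (d : List (List Int)) (j : Int) : List (List Int) :=
  if pvCell d i j == 0 then d
  else
    let d1 := if j < (bl.length : Int) ∧
                 PySem.Chars.upperChar (PySem.List.pyGetD al i ' ') = PySem.List.pyGetD bl j ' '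
              then pvSetCell d (i + 1) (j + 1) 1 else d
    if !(PySem.Chars.isupper (PySem.List.pyGetD al i ' ')) then pvSetCell d1 (i + 1) j 1 else d1

def abbreviation (a : String) (b : String) : String :=
  let al := a.toList
  let bl := b.toList
  let d0 : List (List Int) :=
    (PySem.List.pyRange 0 ((al.length : Int) + 1)).map
      (fun _ => (PySem.List.pyRange 0 ((bl.length : Int) + 1)).map (fun _ => (0 : Int)))
  let d1 := pvSetCell d0 0 0 1
  let d2 := (PySem.List.pyRange 0 (al.length : Int)).foldl
      (fun d i => (PySem.List.pyRange 0 ((bl.length : Int) + 1)).foldl (pvBody al bl i) d) d1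
  if pvCell d2 (al.length : Int) (bl.length : Int) ≠ 0 then "YES" else "NO"

-- ===== PORT B =====
-- f(i, j) of Source B: recursion on the remaining suffix of a (the list cs stands for a[i:]),
-- threading the memo dict; returns (result, memo). 'memo.get((i,j))' is Dict.get?,
-- the short-circuit 'X and f(...) or (Y and f(...))' is the two staged ifs below.
def pvMemoF (bl : List Char) : List Char → Int → Int → PySem.Dict (Int × Int) Bool →
    Bool × PySem.Dict (Int × Int) Bool
  | [], _i, j, memo => (j == (bl.length : Int), memo)   -- i == n: return j == m (memo untouched)
  | c :: cs, i, j, memo =>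
    match memo.get? (i, j) with
    | some hit => (hit, memo)
    | none =>
      let p1 := if j < (bl.length : Int) ∧
                   PySem.Chars.upperChar c = PySem.List.pyGetD bl j ' '
                then pvMemoF bl cs (i + 1) (j + 1) memo
                else (false, memo)
      let p2 := if p1.1 then (true, p1.2)
                else if !(PySem.Chars.isupper c) then pvMemoF bl cs (i + 1) j p1.2
                else (false, p1.2)
      (p2.1, p2.2.insert (i, j) p2.1)

def abbreviation_alt (a : String) (b : String) : String :=
  if (pvMemoF b.toList a.toList 0 0 PySem.Dict.empty).1 then "YES" else "NO"

-- ===== PRECONDITION & SPEC =====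
def Spec_abbreviation (a : String) (b : String) (out : String) : Prop := out = abbreviation_alt a b
instance (a : String) (b : String) (out : String) : Decidable (Spec_abbreviation a b out) := by unfold Spec_abbreviation; infer_instance

-- ===== CLAIM (what is proved, stated in full; the proofs are below) =====
def Claim_equal_abbreviation : Prop := ∀ (a : String) (b : String), Dom_abbreviation a b → Spec_abbreviation a b (abbreviation a b)

-- ===== LEMMAS AND PROOFS =====

-- 'the word xs can be abbreviated to ys': delete lowercase letters, uppercase the rest
def Abb : List Char → List Char → Bool
  | [], ys => ys.isEmpty
  | c :: cs, ys =>
    (match ys with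
     | [] => false
     | d :: ds => (PySem.Chars.upperChar c == d) && Abb cs ds)
    || (!(PySem.Chars.isupper c) && Abb cs ys)

-- ---- B side: every memo entry (i, j) holds Abb (a[i:]) (b[j:]) ----
def GoodMemo (al bl : List Char) (memo : PySem.Dict (Int × Int) Bool) : Prop :=
  ∀ (i j : Int) (v : Bool), memo.get? (i, j) = some v →
    ∃ (ii jj : Nat), i = (ii : Int) ∧ j = (jj : Int) ∧ v = Abb (al.drop ii) (bl.drop jj)

lemma drop_cons_succ (al : List Char) (ii : Nat) (c : Char) (cs : List Char)
    (h : al.drop ii = c :: cs) : al.drop (ii + 1) = cs := by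
  rw [← List.tail_drop, h]
  rfl

lemma GoodMemo_insert (al bl : List Char) (memo : PySem.Dict (Int × Int) Bool)
    (ii jj : Nat) (v : Bool) (hG : GoodMemo al bl memo)
    (hv : v = Abb (al.drop ii) (bl.drop jj)) :
    GoodMemo al bl (memo.insert ((ii : Int), (jj : Int)) v) := by
  intro i' j' w hget
  rw [PySem.Dict.get?_insert] at hget
  split at hget
  · next heq =>
    rw [Prod.mk.injEq] at heq
    have hw : v = w := by injection hget
    exact ⟨ii, jj, heq.1, heq.2, hw ▸ hv⟩
  · exact hG _ _ _ hget

-- b[jj:] splits off its head when jj < len(b)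
lemma drop_split (bl : List Char) (jj : Nat) (h : jj < bl.length) :
    bl.drop jj = bl.getD jj ' ' :: bl.drop (jj + 1) := by
  rw [List.drop_eq_getElem_cons h]
  congr 1
  rw [List.getD, List.getElem?_eq_getElem h]
  rfl

lemma pvMemoF_correct (al bl : List Char) : ∀ (cs : List Char) (ii jj : Nat)
    (memo : PySem.Dict (Int × Int) Bool),
    al.drop ii = cs → jj ≤ bl.length → GoodMemo al bl memo →
    (pvMemoF bl cs (ii : Int) (jj : Int) memo).1 = Abb cs (bl.drop jj) ∧
      GoodMemo al bl (pvMemoF bl cs (ii : Int) (jj : Int) memo).2 := by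
  intro cs
  induction cs with
  | nil =>
    intro ii jj memo _ hjj hG
    refine ⟨?_, hG⟩
    show ((jj : Int) == (bl.length : Int)) = Abb [] (bl.drop jj)
    have habb : Abb [] (bl.drop jj) = (bl.drop jj).isEmpty := rfl
    rw [habb]
    by_cases h : jj = bl.length
    · subst h
      simp
    · have hL : (((jj : Int)) == ((bl.length : Int))) = false := by
        simp only [beq_eq_false_iff_ne, ne_eq, Nat.cast_inj]
        exact h
      have hR : (bl.drop jj).isEmpty = false := by
        have : bl.drop jj ≠ [] := by
          apply List.ne_nil_of_length_pos
          simp only [List.length_drop]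
          omega
        simpa [List.isEmpty_iff] using this
      rw [hL, hR]
  | cons c cs ih =>
    intro ii jj memo hdrop hjj hG
    have hdrop' : al.drop (ii + 1) = cs := drop_cons_succ al ii c cs hdrop
    rw [pvMemoF]
    cases hget : memo.get? ((ii : Int), (jj : Int)) with
    | some hit =>
      obtain ⟨ii', jj', hi, hj, hv⟩ := hG _ _ _ hget
      have hii : ii = ii' := by exact_mod_cast hi
      have hjj' : jj = jj' := by exact_mod_cast hj
      subst hii
      subst hjj'
      rw [hdrop] at hv
      exact ⟨hv, hG⟩
    | none =>
      have e1 : ((ii : Int) + 1) = ((ii + 1 : Nat) : Int) := by push_cast; ring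
      have e2 : ((jj : Int) + 1) = ((jj + 1 : Nat) : Int) := by push_cast; ring
      rw [e1, e2]
      -- the two disjuncts of Abb (c :: cs) (b[jj:])
      have habb : Abb (c :: cs) (bl.drop jj) =
          ((match bl.drop jj with
            | [] => false
            | d :: ds => (PySem.Chars.upperChar c == d) && Abb cs ds)
           || (!(PySem.Chars.isupper c) && Abb cs (bl.drop jj))) := rfl
      by_cases hguard : (jj : Int) < (bl.length : Int) ∧
          PySem.Chars.upperChar c = PySem.List.pyGetD bl (jj : Int) ' '
      · -- guard true: the first recursive call happens
        obtain ⟨hlt, hch⟩ := hguard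
        have hjlt : jj < bl.length := by exact_mod_cast hlt
        have hchD : PySem.Chars.upperChar c = bl.getD jj ' ' := by
          rwa [PySem.List.pyGetD_natCast] at hch
        have hfirst : (match bl.drop jj with
            | [] => false
            | d :: ds => (PySem.Chars.upperChar c == d) && Abb cs ds)
            = Abb cs (bl.drop (jj + 1)) := by
          rw [drop_split bl jj hjlt, ← hchD]
          simp
        rw [if_pos ⟨hlt, hch⟩]
        have h1 := ih (ii + 1) (jj + 1) memo hdrop' (by omega) hG
        cases hp1 : pvMemoF bl cs ((ii + 1 : Nat) : Int) ((jj + 1 : Nat) : Int) memo with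
        | mk r1 m1 =>
          rw [hp1] at h1
          obtain ⟨hv1, hG1⟩ := h1
          dsimp only at hv1 hG1 ⊢
          cases r1 with
          | true =>
            have hres : Abb (c :: cs) (bl.drop jj) = true := by
              rw [habb, hfirst, ← hv1]
              simp
            rw [if_pos rfl]
            refine ⟨hres.symm, ?_⟩
            exact GoodMemo_insert al bl m1 ii jj true hG1 (by rw [hdrop, hres])
          | false =>
            rw [if_neg (by simp)]
            by_cases hlow : (!(PySem.Chars.isupper c)) = true
            · rw [if_pos hlow]
              have h2 := ih (ii + 1) jj m1 hdrop' hjj hG1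
              cases hp2 : pvMemoF bl cs ((ii + 1 : Nat) : Int) ((jj : Nat) : Int) m1 with
              | mk r2 m2 =>
                rw [hp2] at h2
                obtain ⟨hv2, hG2⟩ := h2
                dsimp only at hv2 hG2 ⊢
                have hres : Abb (c :: cs) (bl.drop jj) = r2 := by
                  rw [habb, hfirst, ← hv1, ← hv2, hlow]
                  simp
                refine ⟨hres.symm, ?_⟩
                exact GoodMemo_insert al bl m2 ii jj r2 hG2 (by rw [hdrop, hres])
            · rw [if_neg hlow]
              dsimp only
              have hup : PySem.Chars.isupper c = true := by simpa using hlow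
              have hres : Abb (c :: cs) (bl.drop jj) = false := by
                rw [habb, hfirst, ← hv1, hup]
                simp
              refine ⟨hres.symm, ?_⟩
              exact GoodMemo_insert al bl m1 ii jj false hG1 (by rw [hdrop, hres])
      · -- guard false: no match at b[jj], only the delete branch can apply
        rw [if_neg hguard]
        have hfirst : (match bl.drop jj with
            | [] => false
            | d :: ds => (PySem.Chars.upperChar c == d) && Abb cs ds) = false := by
          cases hsplit : bl.drop jj with
          | nil => rfl
          | cons d ds =>
            have hjlt : jj < bl.length := by
              by_contra h
              have hnil : bl.drop jj = [] := List.drop_eq_nil_iff.mpr (by omega)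
              rw [hnil] at hsplit
              exact (List.cons_ne_nil d ds) hsplit.symm
            have hd : d = bl.getD jj ' ' := by
              have hds : d :: ds = bl.getD jj ' ' :: bl.drop (jj + 1) :=
                hsplit.symm.trans (drop_split bl jj hjlt)
              simpa using congrArg (fun l => l.headD ' ') hds
            have hne : (PySem.Chars.upperChar c == d) = false := by
              simp only [beq_eq_false_iff_ne, ne_eq]
              intro h
              apply hguard
              refine ⟨by exact_mod_cast hjlt, ?_⟩
              rw [PySem.List.pyGetD_natCast, ← hd]
              exact h
            simp [hne]
        dsimp only
        rw [if_neg (by simp)]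
        by_cases hlow : (!(PySem.Chars.isupper c)) = true
        · rw [if_pos hlow]
          have h2 := ih (ii + 1) jj memo hdrop' hjj hG
          cases hp2 : pvMemoF bl cs ((ii + 1 : Nat) : Int) ((jj : Nat) : Int) memo with
          | mk r2 m2 =>
            rw [hp2] at h2
            obtain ⟨hv2, hG2⟩ := h2
            dsimp only at hv2 hG2 ⊢
            have hres : Abb (c :: cs) (bl.drop jj) = r2 := by
              rw [habb, hfirst, ← hv2, hlow]
              simp
            refine ⟨hres.symm, ?_⟩
            exact GoodMemo_insert al bl m2 ii jj r2 hG2 (by rw [hdrop, hres])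
        · rw [if_neg hlow]
          dsimp only
          have hup : PySem.Chars.isupper c = true := by simpa using hlow
          have hres : Abb (c :: cs) (bl.drop jj) = false := by
            rw [habb, hfirst, hup]
            simp
          refine ⟨hres.symm, ?_⟩
          exact GoodMemo_insert al bl memo ii jj false hG (by rw [hdrop, hres])

lemma alt_eq (a b : String) :
    abbreviation_alt a b = if Abb a.toList b.toList then "YES" else "NO" := by
  unfold abbreviation_alt
  have hG : GoodMemo a.toList b.toList PySem.Dict.empty := by
    intro i j v h
    rw [PySem.Dict.get?_empty] at h
    exact absurd h (by simp)
  have h := pvMemoF_correct a.toList b.toList a.toList 0 0 PySem.Dict.empty rfl (by omega) hG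
  rcases h with ⟨h1, _⟩
  simp only [Nat.cast_zero, List.drop_zero] at h1
  rw [h1]

-- ---- A side: cell (i, j) of A's table holds Abb for the prefixes a[:i], b[:j] ----

def Rfun (al bl : List Char) : Nat → Nat → Bool
  | 0, j => decide (j = 0)
  | (i+1), j =>
      (decide (1 ≤ j) && decide (j ≤ bl.length) && Rfun al bl i (j - 1)
         && (PySem.Chars.upperChar (al.getD i ' ') == bl.getD (j - 1) ' '))
      || (Rfun al bl i j && !(PySem.Chars.isupper (al.getD i ' ')))

lemma Abb_snoc (c : Char) (xs : List Char) : ∀ ys : List Char,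
    Abb (xs ++ [c]) ys =
      ((decide (ys ≠ []) && (PySem.Chars.upperChar c == ys.getLastD ' ') && Abb xs ys.dropLast)
        || (!(PySem.Chars.isupper c) && Abb xs ys)) := by
  induction xs with
  | nil =>
    intro ys
    match ys with
    | [] => simp [Abb]
    | [d] => simp [Abb]
    | d :: d2 :: ds => simp [Abb]
  | cons x xs ih =>
    intro ys
    match ys with
    | [] =>
      simp only [Abb, ih, List.cons_append]
      cases PySem.Chars.isupper x <;> cases PySem.Chars.isupper c <;> cases Abb xs [] <;> simp
    | [d] =>
      simp only [Abb, ih, List.cons_append]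
      simp only [ne_eq, List.cons_ne_nil,
        not_false_eq_true, decide_true, List.dropLast_nil, List.getLastD_nil, Bool.true_and]
      cases PySem.Chars.upperChar x == d <;> cases PySem.Chars.isupper x <;>
      cases PySem.Chars.upperChar c == d <;> cases PySem.Chars.isupper c <;>
      cases Abb xs [] <;> cases Abb xs [d] <;> simp
    | d :: d2 :: ds =>
      have h2 : (d :: d2 :: ds).dropLast = d :: (d2 :: ds).dropLast := by simp
      have h3 : (d :: d2 :: ds).getLastD ' ' = (d2 :: ds).getLastD ' ' := by simp
      simp only [Abb, ih, h2, h3, List.cons_append]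
      cases PySem.Chars.upperChar x == d <;>
      cases PySem.Chars.isupper x <;>
      cases PySem.Chars.upperChar c == (d2 :: ds).getLastD ' ' <;>
      cases PySem.Chars.isupper c <;>
      cases Abb xs ((d2 :: ds).dropLast) <;> cases hx : Abb xs (d :: (d2::ds).dropLast) <;>
      cases Abb xs (d2 :: ds) <;> cases Abb xs (d :: d2 :: ds) <;>
        simp

lemma getLastD_take (l : List Char) (j : Nat) (h1 : 1 ≤ j) (h2 : j ≤ l.length) : (l.take j).getLastD ' ' = l.getD (j-1) ' ' := by
  have : (l.take j).getLastD ' ' = (l.take j).getD ((l.take j).length - 1) ' ' := by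
    cases h : l.take j with
    | nil => rfl
    | cons a as =>
      rw [List.getLastD_eq_getLast?, List.getLast?_eq_getElem?]
      simp [List.getD]
  rw [this]
  simp only [List.length_take, List.getD]
  rw [List.getElem?_take]
  have : min j l.length = j := by omega
  rw [this]
  rw [if_pos (by omega)]

lemma dropLast_take (l : List Char) (j : Nat) (h2 : j ≤ l.length) : (l.take j).dropLast = l.take (j-1) := by
  rw [List.dropLast_eq_take, List.take_take]
  congr 1
  simp [List.length_take]
  omega

lemma Rfun_eq_Abb (al bl : List Char) : ∀ i j, i ≤ al.length → j ≤ bl.length →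
    Rfun al bl i j = Abb (al.take i) (bl.take j) := by
  intro i
  induction i with
  | zero =>
    intro j _ hj
    simp only [Rfun, List.take_zero, Abb]
    cases j with
    | zero => simp
    | succ j' =>
      have : bl.take (j'+1) ≠ [] := by
        apply List.ne_nil_of_length_pos
        simp only [List.length_take]
        omega
      cases h : bl.take (j'+1) with
      | nil => exact absurd h this
      | cons d ds => simp
  | succ i ih =>
    intro j hi hj
    have hil : i < al.length := by omega
    have htake : al.take (i+1) = al.take i ++ [al.getD i ' '] := by
      rw [List.take_add_one]
      congr 1
      rw [List.getElem?_eq_getElem hil]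
      simp [List.getD, List.getElem?_eq_getElem hil]
    rw [htake, Abb_snoc]
    by_cases h1 : 1 ≤ j
    · have hne : bl.take j ≠ [] := by
        apply List.ne_nil_of_length_pos
        simp only [List.length_take]
        omega
      rw [getLastD_take bl j h1 hj, dropLast_take bl j hj,
          ← ih (j-1) (by omega) (by omega), ← ih j (by omega) hj]
      simp only [Rfun]
      simp only [hne, h1, hj, decide_true, ne_eq, not_false_eq_true, Bool.true_and]
      cases Rfun al bl i (j-1) <;> cases Rfun al bl i j <;> simp [Bool.and_comm]
    · have hj0 : j = 0 := by omega
      subst hj0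
      have h0 := ih 0 (by omega) (by omega)
      simp only [List.take_zero] at h0
      simp only [Rfun, List.take_zero]
      rw [← h0]
      simp [Bool.and_comm]

-- ---- A side: the loops compute the reachability table Tspec ----
def Tspec (al bl : List Char) (k : Nat) : List (List Int) :=
  (List.range (al.length + 1)).map (fun i =>
    (List.range (bl.length + 1)).map (fun j =>
      if i ≤ k ∧ Rfun al bl i j then (1 : Int) else 0))

-- the match-write and delete-write conditions of outer iteration k
def matchW (al bl : List Char) (k j : Nat) : Bool :=
  decide (1 ≤ j) && decide (j ≤ bl.length) && Rfun al bl k (j - 1)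
    && (PySem.Chars.upperChar (al.getD k ' ') == bl.getD (j - 1) ' ')
def lowW (al bl : List Char) (k j : Nat) : Bool :=
  Rfun al bl k j && !(PySem.Chars.isupper (al.getD k ' '))

lemma Rfun_succ (al bl : List Char) (k j : Nat) :
    Rfun al bl (k+1) j = (matchW al bl k j || lowW al bl k j) := rfl

-- row k+1 after the first t inner iterations of outer iteration k
def PRow (al bl : List Char) (k t : Nat) : List Int :=
  (List.range (bl.length + 1)).map (fun j =>
    if (matchW al bl k j = true ∧ j ≤ t) ∨ (lowW al bl k j = true ∧ j < t) then (1 : Int) else 0)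

-- table state during outer iteration k, after t inner iterations
def Tmid (al bl : List Char) (k t : Nat) : List (List Int) :=
  (List.range (al.length + 1)).map (fun i =>
    if i = k + 1 then PRow al bl k t
    else (List.range (bl.length + 1)).map (fun j =>
      if i ≤ k ∧ Rfun al bl i j then (1 : Int) else 0))

lemma Tmid_zero (al bl : List Char) (k : Nat) (hk : k < al.length) :
    Tmid al bl k 0 = Tspec al bl k := by
  unfold Tmid Tspec PRow
  apply List.map_congr_left
  intro i hi
  split
  · next h =>
    subst h
    apply List.map_congr_left
    intro j hj
    have : ¬ ((matchW al bl k j = true ∧ j ≤ 0) ∨ (lowW al bl k j = true ∧ j < 0)) := by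
      rintro (⟨hm, hj0⟩ | ⟨_, hj0⟩)
      · interval_cases j
        simp [matchW] at hm
      · omega
    rw [if_neg this, if_neg]
    rintro ⟨h1, _⟩
    omega
  · rfl

lemma Tmid_full (al bl : List Char) (k : Nat) (hk : k < al.length) :
    Tmid al bl k (bl.length + 1) = Tspec al bl (k + 1) := by
  unfold Tmid Tspec PRow
  apply List.map_congr_left
  intro i hi
  split
  · next h =>
    subst h
    apply List.map_congr_left
    intro j hj
    simp only [List.mem_range] at hj
    have h1 : j ≤ bl.length + 1 := by omega
    have h2 : j < bl.length + 1 := by omega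
    simp [h1, h2, Rfun_succ, Bool.or_eq_true]
  · next h =>
    apply List.map_congr_left
    intro j hj
    have : (i ≤ k ∧ Rfun al bl i j = true) ↔ (i ≤ k + 1 ∧ Rfun al bl i j = true) := by
      constructor
      · rintro ⟨h1, h2⟩; exact ⟨by omega, h2⟩
      · rintro ⟨h1, h2⟩; exact ⟨by omega, h2⟩
    rw [if_congr this rfl rfl]

-- table with row k+1 replaced by r
def TmidR (al bl : List Char) (k : Nat) (r : List Int) : List (List Int) :=
  (List.range (al.length + 1)).map (fun i =>
    if i = k + 1 then r
    else (List.range (bl.length + 1)).map (fun j =>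
      if i ≤ k ∧ Rfun al bl i j then (1 : Int) else 0))

lemma Tmid_eq_TmidR (al bl : List Char) (k t : Nat) :
    Tmid al bl k t = TmidR al bl k (PRow al bl k t) := rfl

lemma getD_TmidR_row (al bl : List Char) (k : Nat) (r : List Int) (hk : k + 1 < al.length + 1) :
    (TmidR al bl k r).getD (k+1) [] = r := by
  unfold TmidR
  rw [PySem.List.getD_map_range _ _ _ _ hk]
  simp

lemma set_TmidR (al bl : List Char) (k : Nat) (r r' : List Int) :
    (TmidR al bl k r).set (k+1) r' = TmidR al bl k r' := by
  unfold TmidR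
  apply List.ext_getElem
  · simp
  · intro i h1 h2
    simp only [List.getElem_set, List.getElem_map, List.length_map, List.length_range] at *
    rw [List.getElem_range]
    split
    · next h => subst h; simp
    · next h => rw [if_neg (by omega), if_neg (by omega)]


lemma length_PRow (al bl : List Char) (k t : Nat) : (PRow al bl k t).length = bl.length + 1 := by
  simp [PRow]

lemma PRow_succ (al bl : List Char) (k t : Nat) (ht : t ≤ bl.length) (hR : Rfun al bl k t = true) :
    PRow al bl k (t+1) =
      (if (!(PySem.Chars.isupper (al.getD k ' '))) = true
       then (if t < bl.length ∧ PySem.Chars.upperChar (al.getD k ' ') = bl.getD t ' '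
             then (PRow al bl k t).set (t+1) 1 else PRow al bl k t).set t 1
       else (if t < bl.length ∧ PySem.Chars.upperChar (al.getD k ' ') = bl.getD t ' '
             then (PRow al bl k t).set (t+1) 1 else PRow al bl k t)) := by
  have hm1 : matchW al bl k (t+1) = true ↔
      (t < bl.length ∧ PySem.Chars.upperChar (al.getD k ' ') = bl.getD t ' ') := by
    simp only [matchW, Nat.add_sub_cancel, Bool.and_eq_true, decide_eq_true_eq, beq_iff_eq, hR,
      and_true, and_assoc]
    constructor
    · rintro ⟨_, h2, h3⟩; exact ⟨by omega, h3⟩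
    · rintro ⟨h2, h3⟩; exact ⟨by omega, by omega, h3⟩
  have hl1 : lowW al bl k t = !(PySem.Chars.isupper (al.getD k ' ')) := by
    simp [lowW, hR]
  have lhs : ∀ (j : Nat), j < bl.length + 1 → ∀ (h : j < (PRow al bl k (t+1)).length),
      (PRow al bl k (t+1))[j] =
        (if (matchW al bl k j = true ∧ j ≤ t+1) ∨ (lowW al bl k j = true ∧ j < t+1)
         then (1:Int) else 0) := by
    intro j hj h
    unfold PRow
    simp [List.getElem_map, List.getElem_range]
  have prj : ∀ (j : Nat), j < bl.length + 1 → ∀ (h' : j < (PRow al bl k t).length),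
      (PRow al bl k t)[j] =
        (if (matchW al bl k j = true ∧ j ≤ t) ∨ (lowW al bl k j = true ∧ j < t)
         then (1:Int) else 0) := by
    intro j hj h'
    unfold PRow
    simp [List.getElem_map, List.getElem_range]
  have hgen : ∀ (j : Nat), j ≠ t → j ≠ t + 1 →
      ((if (matchW al bl k j = true ∧ j ≤ t+1) ∨ (lowW al bl k j = true ∧ j < t+1)
        then (1:Int) else 0)
        = (if (matchW al bl k j = true ∧ j ≤ t) ∨ (lowW al bl k j = true ∧ j < t)
           then (1:Int) else 0)) := by
    intro j h' h''
    congr 1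
    simp only [eq_iff_iff]
    constructor
    · rintro (⟨hm, hle⟩ | ⟨hl, hlt⟩)
      · exact Or.inl ⟨hm, by omega⟩
      · exact Or.inr ⟨hl, by omega⟩
    · rintro (⟨hm, hle⟩ | ⟨hl, hlt⟩)
      · exact Or.inl ⟨hm, by omega⟩
      · exact Or.inr ⟨hl, by omega⟩
  have hmid : ∀ (j : Nat), j ≠ t → j ≠ t + 1 → ∀ (h1 : j < (PRow al bl k (t+1)).length)
      (h2 : j < (PRow al bl k t).length),
      (PRow al bl k (t+1))[j] = (PRow al bl k t)[j] := by
    intro j h' h'' h1 h2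
    have hj : j < bl.length + 1 := by
      have := h2; rwa [length_PRow] at this
    rw [lhs j hj h1, prj j hj h2, hgen j h' h'']
  have hjt' : ∀ (h1 : t < (PRow al bl k (t+1)).length), (PRow al bl k (t+1))[t] =
      (if (matchW al bl k t = true) ∨ (lowW al bl k t = true) then (1:Int) else 0) := by
    intro h1
    rw [lhs t (by omega) h1]
    congr 1
    simp only [eq_iff_iff]
    constructor
    · rintro (⟨hm, _⟩ | ⟨hl, _⟩)
      · exact Or.inl hm
      · exact Or.inr hl
    · rintro (hm | hl)
      · exact Or.inl ⟨hm, by omega⟩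
      · exact Or.inr ⟨hl, by omega⟩
  by_cases hlow : (!(PySem.Chars.isupper (al.getD k ' '))) = true <;>
    by_cases hC : t < bl.length ∧ PySem.Chars.upperChar (al.getD k ' ') = bl.getD t ' '
  · rw [if_pos hC, if_pos hlow]
    apply List.ext_getElem
    · simp [length_PRow]
    · intro j h1 h2
      simp only [List.getElem_set, List.length_set, length_PRow] at h2 ⊢
      rcases eq_or_ne t j with hjt | hjt
      · subst hjt
        rw [if_pos rfl, hjt' h1, if_pos (Or.inr (by rw [hl1]; exact hlow))]
      · rcases eq_or_ne (t+1) j with hjt1 | hjt1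
        · subst hjt1
          rw [if_neg (by omega), if_pos rfl, lhs (t+1) (by have := h1; rwa [length_PRow] at this) h1,
              if_pos (Or.inl ⟨hm1.mpr hC, by omega⟩)]
        · rw [if_neg (by omega), if_neg (by omega)]
          exact hmid j (Ne.symm hjt) (Ne.symm hjt1) h1 (by rwa [length_PRow])
  · rw [if_neg hC, if_pos hlow]
    apply List.ext_getElem
    · simp [length_PRow]
    · intro j h1 h2
      simp only [List.getElem_set, List.length_set, length_PRow] at h2 ⊢
      rcases eq_or_ne t j with hjt | hjt
      · subst hjt
        rw [if_pos rfl, hjt' h1, if_pos (Or.inr (by rw [hl1]; exact hlow))]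
      · rcases eq_or_ne (t+1) j with hjt1 | hjt1
        · subst hjt1
          rw [if_neg (by omega), lhs (t+1) (by have := h1; rwa [length_PRow] at this) h1, prj (t+1) (by have := h1; rwa [length_PRow] at this) (by rwa [length_PRow]),
              if_neg, if_neg]
          · rintro (⟨_, hle⟩ | ⟨_, hlt⟩) <;> omega
          · rintro (⟨hm, _⟩ | ⟨_, hlt⟩)
            · exact hC (hm1.mp hm)
            · omega
        · rw [if_neg (by omega)]
          exact hmid j (Ne.symm hjt) (Ne.symm hjt1) h1 (by rwa [length_PRow])
  · rw [if_pos hC, if_neg hlow]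
    have hlf : lowW al bl k t = false := by
      rw [hl1]; simpa using hlow
    apply List.ext_getElem
    · simp [length_PRow]
    · intro j h1 h2
      simp only [List.getElem_set, List.length_set, length_PRow] at h2 ⊢
      rcases eq_or_ne t j with hjt | hjt
      · subst hjt
        rw [if_neg (by omega), hjt' h1, prj t (by omega) (by rwa [length_PRow])]
        congr 1
        simp only [eq_iff_iff]
        constructor
        · rintro (hm | hl)
          · exact Or.inl ⟨hm, by omega⟩
          · rw [hlf] at hl; exact absurd hl (by simp)
        · rintro (⟨hm, _⟩ | ⟨hl, _⟩)
          · exact Or.inl hm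
          · exact Or.inr hl
      · rcases eq_or_ne (t+1) j with hjt1 | hjt1
        · subst hjt1
          rw [if_pos rfl, lhs (t+1) (by have := h1; rwa [length_PRow] at this) h1, if_pos (Or.inl ⟨hm1.mpr hC, by omega⟩)]
        · rw [if_neg (by omega)]
          exact hmid j (Ne.symm hjt) (Ne.symm hjt1) h1 (by rwa [length_PRow])
  · rw [if_neg hC, if_neg hlow]
    have hlf : lowW al bl k t = false := by
      rw [hl1]; simpa using hlow
    apply List.ext_getElem
    · simp [length_PRow]
    · intro j h1 h2
      rcases eq_or_ne t j with hjt | hjt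
      · subst hjt
        rw [hjt' h1, prj t (by omega) h2]
        congr 1
        simp only [eq_iff_iff]
        constructor
        · rintro (hm | hl)
          · exact Or.inl ⟨hm, by omega⟩
          · rw [hlf] at hl; exact absurd hl (by simp)
        · rintro (⟨hm, _⟩ | ⟨hl, _⟩)
          · exact Or.inl hm
          · exact Or.inr hl
      · rcases eq_or_ne (t+1) j with hjt1 | hjt1
        · subst hjt1
          rw [lhs (t+1) (by have := h1; rwa [length_PRow] at this) h1, prj (t+1) (by have := h1; rwa [length_PRow] at this) h2, if_neg, if_neg]
          · rintro (⟨_, hle⟩ | ⟨_, hlt⟩) <;> omega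
          · rintro (⟨hm, _⟩ | ⟨_, hlt⟩)
            · exact hC (hm1.mp hm)
            · omega
        · exact hmid j (Ne.symm hjt) (Ne.symm hjt1) h1 h2

lemma body_step (al bl : List Char) (k t : Nat) (hk : k < al.length) (ht : t ≤ bl.length) :
    pvBody al bl (k : Int) (Tmid al bl k t) (t : Int) = Tmid al bl k (t+1) := by
  have hkn : k < al.length + 1 := by omega
  have hk1 : k + 1 < al.length + 1 := by omega
  have htm : t < bl.length + 1 := by omega
  -- the cell read by the body
  have hread : pvCell (Tmid al bl k t) (k : Int) (t : Int)
      = (if Rfun al bl k t then (1:Int) else 0) := by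
    unfold pvCell
    rw [PySem.List.pyGetD_natCast, PySem.List.pyGetD_natCast]
    unfold Tmid
    rw [PySem.List.getD_map_range _ _ _ _ hkn, if_neg (by omega),
        PySem.List.getD_map_range _ _ _ _ htm]
    simp
  by_cases hR : Rfun al bl k t = true
  · -- cell is 1: the two conditional writes happen
    have hread1 : pvCell (Tmid al bl k t) (k : Int) (t : Int) = 1 := by rw [hread, if_pos hR]
    unfold pvBody
    rw [hread1]
    simp only [PySem.List.pyGetD_natCast]
    norm_num
    -- turn Int indices into Nat casts
    have e1 : (k : Int) + 1 = ((k+1 : Nat) : Int) := by push_cast; ring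
    have e2 : (t : Int) + 1 = ((t+1 : Nat) : Int) := by push_cast; ring
    rw [e1, e2]
    have hset : ∀ (r : List Int) (jj : Nat) (v : Int),
        pvSetCell (TmidR al bl k r) ((k+1 : Nat) : Int) ((jj : Nat) : Int) v
          = TmidR al bl k (r.set jj v) := by
      intro r jj v
      unfold pvSetCell
      rw [PySem.List.pyGetD_natCast, PySem.List.pySetD_natCast, PySem.List.pySetD_natCast]
      rw [getD_TmidR_row al bl k r hk1, set_TmidR]
    rw [Tmid_eq_TmidR, Tmid_eq_TmidR]
    try simp only [Nat.cast_lt]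
    rw [PRow_succ al bl k t ht hR]
    simp only [← List.getD_eq_getElem?_getD, Bool.not_eq_true']
    by_cases hlow : PySem.Chars.isupper (al.getD k ' ') = false <;>
      by_cases hCc : t < bl.length ∧ PySem.Chars.upperChar (al.getD k ' ') = bl.getD t ' '
    · rw [if_pos hCc, if_pos hlow, hset, hset, if_pos hlow, if_pos hCc]
    · rw [if_neg hCc, if_pos hlow, hset, if_pos hlow, if_neg hCc]
    · rw [if_pos hCc, if_neg hlow, hset, if_neg hlow, if_pos hCc]
    · rw [if_neg hCc, if_neg hlow, if_neg hlow, if_neg hCc]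
  · -- cell is 0: the body is the identity, and the row invariant is unchanged
    have hread0 : pvCell (Tmid al bl k t) (k : Int) (t : Int) = 0 := by
      rw [hread, if_neg hR]
    unfold pvBody
    rw [hread0]
    norm_num
    unfold Tmid
    apply List.map_congr_left
    intro i hi
    split
    · next h =>
      unfold PRow
      apply List.map_congr_left
      intro j hj
      congr 1
      simp only [eq_iff_iff]
      constructor
      · rintro (⟨hm, hle⟩ | ⟨hl, hlt⟩)
        · exact Or.inl ⟨hm, by omega⟩
        · exact Or.inr ⟨hl, by omega⟩
      · rintro (⟨hm, hle⟩ | ⟨hl, hlt⟩)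
        · left
          refine ⟨hm, ?_⟩
          rcases Nat.lt_or_ge j (t+1) with h' | h'
          · omega
          · exfalso
            have hj1 : j = t + 1 := by omega
            subst hj1
            simp only [matchW, Nat.add_sub_cancel] at hm
            simp [hR] at hm
        · right
          refine ⟨hl, ?_⟩
          rcases Nat.lt_or_ge j t with h' | h'
          · omega
          · exfalso
            have hj1 : j = t := by omega
            subst hj1
            simp only [lowW] at hl
            simp [hR] at hl
    · rfl

lemma inner_loop (al bl : List Char) (k : Nat) (hk : k < al.length) : ∀ t, t ≤ bl.length + 1 →
    (PySem.List.pyRange 0 (t : Int)).foldl (pvBody al bl (k : Int)) (Tmid al bl k 0)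
      = Tmid al bl k t := by
  intro t
  induction t with
  | zero => intro _; simp [PySem.List.pyRange]
  | succ t ih =>
    intro ht
    have e : ((t+1 : Nat) : Int) = ((t : Nat) : Int) + 1 := by push_cast; ring
    rw [e, PySem.List.pyRange_one_succ_right (by positivity), List.foldl_append, ih (by omega)]
    simp only [List.foldl_cons, List.foldl_nil]
    exact body_step al bl k t hk (by omega)

lemma outer_loop (al bl : List Char) : ∀ k, k ≤ al.length →
    (PySem.List.pyRange 0 (k : Int)).foldl
      (fun d i => (PySem.List.pyRange 0 ((bl.length : Int) + 1)).foldl (pvBody al bl i) d)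
      (Tspec al bl 0) = Tspec al bl k := by
  intro k
  induction k with
  | zero => intro _; simp [PySem.List.pyRange]
  | succ k ih =>
    intro hk
    have e : ((k+1 : Nat) : Int) = ((k : Nat) : Int) + 1 := by push_cast; ring
    rw [e, PySem.List.pyRange_one_succ_right (a := 0) (b := (k : Int)) (by positivity),
        List.foldl_append, ih (by omega)]
    simp only [List.foldl_cons, List.foldl_nil]
    have e2 : ((bl.length : Int) + 1) = ((bl.length + 1 : Nat) : Int) := by push_cast; ring
    rw [e2, ← Tmid_zero al bl k (by omega), inner_loop al bl k (by omega) (bl.length+1) le_rfl,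
        Tmid_full al bl k (by omega)]

lemma init_lemma (al bl : List Char) :
    pvSetCell ((PySem.List.pyRange 0 ((al.length : Int) + 1)).map
        (fun _ => (PySem.List.pyRange 0 ((bl.length : Int) + 1)).map (fun _ => (0 : Int)))) 0 0 1
      = Tspec al bl 0 := by
  have e1 : ((al.length : Int) + 1) = ((al.length + 1 : Nat) : Int) := by push_cast; ring
  have e2 : ((bl.length : Int) + 1) = ((bl.length + 1 : Nat) : Int) := by push_cast; ring
  rw [e1, e2, PySem.List.pyRange_zero_natCast, PySem.List.pyRange_zero_natCast]
  simp only [List.map_map]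
  unfold pvSetCell
  have ez : (0 : Int) = ((0 : Nat) : Int) := by norm_num
  rw [ez, PySem.List.pyGetD_natCast, PySem.List.pySetD_natCast, PySem.List.pySetD_natCast,
      PySem.List.getD_map_range _ _ _ _ (by omega)]
  simp only [Function.comp_apply]
  unfold Tspec
  apply List.ext_getElem
  · simp
  · intro i h1 h2
    simp only [List.getElem_set, List.getElem_map, List.length_set, List.length_map,
      List.length_range] at h1 h2 ⊢
    rw [List.getElem_range]
    rcases Nat.eq_zero_or_pos i with hi | hi
    · subst hi
      rw [if_pos rfl]
      apply List.ext_getElem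
      · simp
      · intro j hj1 hj2
        simp only [List.getElem_set, List.getElem_map, List.length_set, List.length_map,
          List.length_range] at hj1 hj2 ⊢
        rw [List.getElem_range]
        rcases Nat.eq_zero_or_pos j with hj | hj
        · subst hj
          simp [Rfun]
        · have hjne : j ≠ 0 := by omega
          simp [Rfun, hjne, Ne.symm hjne]
    · rw [if_neg (by omega)]
      apply List.ext_getElem
      · simp
      · intro j hj1 hj2
        simp only [List.getElem_map, List.length_map, List.length_range,
          Function.comp_apply] at hj1 hj2 ⊢
        rw [List.getElem_range, if_neg (by rintro ⟨hle, -⟩; omega)]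
        simp

lemma final_read (al bl : List Char) :
    pvCell (Tspec al bl al.length) (al.length : Int) (bl.length : Int)
      = if Rfun al bl al.length bl.length then 1 else 0 := by
  unfold pvCell Tspec
  rw [PySem.List.pyGetD_natCast, PySem.List.pyGetD_natCast,
      PySem.List.getD_map_range _ _ _ _ (by omega), PySem.List.getD_map_range _ _ _ _ (by omega)]
  simp

lemma A_eq (a b : String) :
    abbreviation a b
      = if Rfun a.toList b.toList a.toList.length b.toList.length then "YES" else "NO" := by
  unfold abbreviation
  simp only [init_lemma, outer_loop a.toList b.toList a.toList.length le_rfl, final_read]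
  by_cases h : Rfun a.toList b.toList a.toList.length b.toList.length = true <;> simp [h]

-- ===== VERDICT (by name: the statement is the Claim_ definition above) =====
theorem abbreviation_spec : Claim_equal_abbreviation := by
  intro a b _
  unfold Spec_abbreviation
  rw [A_eq, alt_eq, Rfun_eq_Abb a.toList b.toList _ _ le_rfl le_rfl, List.take_length,
      List.take_length]
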